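-- pv_equiv track=rewrite | github.com/uchino83/NLP-Assignment-3 | main.py | isalpha
-- ===== SOURCE A (Python) =====
-- import string
--
-- def isalpha(word):
--     mychars = string.ascii_lowercase + string.ascii_uppercase + "_"
--     flag = True
--     for char in word:
--         if char not in mychars:
--             flag = False
--             break
--     return flag
-- ===== SOURCE B (Python) =====
-- import string
--
-- def isalpha(word):
--     stripped = word.replace("_", "")
--     return stripped == "" or stripped.isalpha()
-- ===== Notes on version B (the rewrite author's own statement) =====
-- stated objective: idiomatic
-- what changed: Instead of scanning characters against a hand-built allowed-alphabet string with an early-break loop, B strips out underscores with str.replace and delegates the letter test to the built-in str.isalpha, handling the all-underscore/empty residue by an emptiness check.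
import Mathlib
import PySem

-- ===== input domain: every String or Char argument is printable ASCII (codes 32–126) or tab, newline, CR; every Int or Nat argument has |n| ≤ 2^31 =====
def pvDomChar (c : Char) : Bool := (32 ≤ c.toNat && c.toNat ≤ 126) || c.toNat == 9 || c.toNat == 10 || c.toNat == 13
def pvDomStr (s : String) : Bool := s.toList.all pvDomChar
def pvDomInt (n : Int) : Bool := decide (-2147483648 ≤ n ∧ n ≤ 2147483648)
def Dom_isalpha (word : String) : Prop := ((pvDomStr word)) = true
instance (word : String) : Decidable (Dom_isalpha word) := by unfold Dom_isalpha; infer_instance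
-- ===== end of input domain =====

-- B strips underscores with str.replace and delegates the letter test to the built-in
-- str.isalpha (empty residue handled by an emptiness check), instead of A's explicit
-- scan against a hand-built allowed-alphabet string.

-- ===== PORT A =====
-- mychars = string.ascii_lowercase + string.ascii_uppercase + "_"
def pvMychars : List Char :=
  "abcdefghijklmnopqrstuvwxyzABCDEFGHIJKLMNOPQRSTUVWXYZ_".toList

-- the for-loop: flag starts True; on the first char not in mychars, set False and break
def isalphaLoop : List Char → Bool
  | [] => true
  | c :: rest => if ¬ (pvMychars.contains c) then false else isalphaLoop rest

def isalpha (word : String) : Bool := isalphaLoop word.toList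

-- ===== PORT B =====
-- stripped = word.replace("_", ""); return stripped == "" or stripped.isalpha()
def isalpha_alt (word : String) : Bool :=
  let stripped := PySem.Str.replace word "_" ""
  stripped == "" || PySem.Str.strIsalpha stripped

-- ===== PRECONDITION & SPEC =====
def Spec_isalpha (word : String) (out : Bool) : Prop := out = isalpha_alt word
instance (word : String) (out : Bool) : Decidable (Spec_isalpha word out) := by unfold Spec_isalpha; infer_instance

-- ===== CLAIM (what is proved, stated in full; the proofs are below) =====
def Claim_equal_isalpha : Prop := ∀ (word : String), Dom_isalpha word → Spec_isalpha word (isalpha word)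

-- ===== LEMMAS AND PROOFS =====

-- A's loop returns true iff every character lies in mychars
theorem isalphaLoop_eq_true_iff (l : List Char) :
    isalphaLoop l = true ↔ ∀ c ∈ l, c ∈ pvMychars := by
  induction l with
  | nil => simp [isalphaLoop]
  | cons c rest ih =>
    simp only [isalphaLoop]
    by_cases h : c ∈ pvMychars
    · simp [h, ih, List.mem_cons]
    · simp [h, List.mem_cons]

theorem char_toNat_injective : Function.Injective Char.toNat := by
  intro a b h
  have : a.val = b.val := by
    rw [← Char.ofNat_toNat_eq_val, ← Char.ofNat_toNat_eq_val, h]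
  exact Char.ext this

theorem toNat_mem_iff (c : Char) :
    c ∈ pvMychars ↔ c.toNat ∈ pvMychars.map Char.toNat :=
  (List.mem_map_of_injective char_toNat_injective).symm

theorem map_toNat_mychars :
    pvMychars.map Char.toNat = [97,98,99,100,101,102,103,104,105,106,107,108,109,110,111,112,113,114,115,116,117,118,119,120,121,122,65,66,67,68,69,70,71,72,73,74,75,76,77,78,79,80,81,82,83,84,85,86,87,88,89,90,95] := by decide

theorem char_le_iff (a c : Char) : a ≤ c ↔ a.toNat ≤ c.toNat := by
  rw [Char.le_def, UInt32.le_iff_toNat_le, Char.toNat_val, Char.toNat_val]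

-- membership in A's alphabet coincides with "ASCII letter or underscore"
theorem mem_mychars_iff (c : Char) :
    c ∈ pvMychars ↔ ((PySem.Chars.isalpha c || c == '_') = true) := by
  rw [toNat_mem_iff, map_toNat_mychars]
  have h95 : (c == '_') = decide (c.toNat = 95) := by
    apply Bool.coe_iff_coe.mp
    simp only [beq_iff_eq, decide_eq_true_eq]
    exact ⟨fun h => by subst h; rfl, fun h => char_toNat_injective h⟩
  simp only [PySem.Chars.isalpha, PySem.Chars.isupper, PySem.Chars.islower,
    char_le_iff, h95, List.mem_cons, List.not_mem_nil, or_false,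
    Bool.or_eq_true, Bool.and_eq_true, decide_eq_true_eq]
  have e1 : 'A'.toNat = 65 := rfl
  have e2 : 'Z'.toNat = 90 := rfl
  have e3 : 'a'.toNat = 97 := rfl
  have e4 : 'z'.toNat = 122 := rfl
  rw [e1, e2, e3, e4]
  omega

-- replacing the single character '_' by the empty string filters out underscores
theorem replace_go_filter (fuel : ℕ) (l acc : List Char) (h : l.length ≤ fuel) :
    PySem.Chars.replace.go ['_'] [] fuel l acc
      = acc.reverse ++ l.filter (fun c => !(c == '_')) := by
  induction fuel generalizing l acc with
  | zero =>
    have : l = [] := List.length_eq_zero_iff.mp (Nat.le_zero.mp h)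
    subst this
    simp [PySem.Chars.replace.go]
  | succ fuel ih =>
    cases l with
    | nil => simp [PySem.Chars.replace.go]
    | cons c t =>
      rw [PySem.Chars.replace.go]
      by_cases hc : c = '_'
      · subst hc
        have hp : List.isPrefixOf ['_'] ('_' :: t) = true := by
          simp [List.isPrefixOf]
        rw [if_pos hp]
        have hd : List.drop (List.length ['_']) ('_' :: t) = t := rfl
        have ha : ([] : List Char).reverse ++ acc = acc := rfl
        rw [hd, ha, ih t acc (by simpa using h)]
        simp
      · have hp : List.isPrefixOf ['_'] (c :: t) = false := by
          simp [List.isPrefixOf]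
          exact fun hh => hc hh.symm
        simp only [hp, Bool.false_eq_true, if_false]
        rw [ih t (c :: acc) (by simpa using h)]
        simp [hc]

theorem replace_filter (l : List Char) :
    PySem.Chars.replace l ['_'] [] = l.filter (fun c => !(c == '_')) := by
  rw [PySem.Chars.replace]
  simp only [List.isEmpty_cons, Bool.false_eq_true, if_false]
  simpa using replace_go_filter l.length l [] (le_refl _)

-- B returns true iff every character is a letter or an underscore
theorem isalpha_alt_eq_true_iff (word : String) :
    isalpha_alt word = true ↔
      ∀ c ∈ word.toList, (PySem.Chars.isalpha c || c == '_') = true := by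
  unfold isalpha_alt
  set f := word.toList.filter (fun c => !(c == '_')) with hf
  have htl : (PySem.Str.replace word "_" "").toList = f := by
    rw [PySem.Str.toList_replace]; exact replace_filter word.toList
  have hempty : ((PySem.Str.replace word "_" "") == "") = f.isEmpty := by
    apply Bool.coe_iff_coe.mp
    simp only [beq_iff_eq, List.isEmpty_iff, ← htl]
    constructor
    · intro h; rw [h]; rfl
    · intro h
      have h2 := congrArg String.ofList h
      rw [String.ofList_toList] at h2
      exact h2.trans rfl
  have hall : PySem.Str.strIsalpha (PySem.Str.replace word "_" "")
      = (!f.isEmpty && f.all PySem.Chars.isalpha) := by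
    simp only [PySem.Str.strIsalpha, PySem.Chars.strIsalpha, htl]
  show ((PySem.Str.replace word "_" "" == "") || PySem.Str.strIsalpha (PySem.Str.replace word "_" "")) = true ↔ _
  rw [hempty, hall]
  constructor
  · intro h c hc
    by_cases hu : (c == '_') = true
    · simp [hu]
    · have hcf : c ∈ f := by
        rw [hf]
        exact List.mem_filter.mpr ⟨hc, by simp [Bool.eq_false_iff.mpr hu]⟩
      have hne : f.isEmpty = false := by
        cases he : f.isEmpty
        · rfl
        · have hfe : f = [] := List.isEmpty_iff.mp he
          rw [hfe] at hcf
          exact absurd hcf (List.not_mem_nil)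
      rw [Bool.or_eq_true] at h
      rcases h with h1 | h2
      · rw [hne] at h1; exact absurd h1 (by simp)
      · rw [Bool.and_eq_true] at h2
        have := List.all_eq_true.mp h2.2 c hcf
        simp [this]
  · intro h
    cases he : f.isEmpty with
    | true => simp
    | false =>
      rw [Bool.or_eq_true]
      right
      rw [Bool.and_eq_true]
      refine ⟨by simp, List.all_eq_true.mpr ?_⟩
      intro c hcf
      have hcf' : c ∈ word.toList.filter (fun c => !(c == '_')) := by rw [← hf]; exact hcf
      rcases List.mem_filter.mp hcf' with ⟨hcm, hcu⟩
      have hm := h c hcm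
      rw [Bool.or_eq_true] at hm
      rcases hm with h1 | h2
      · exact h1
      · exact absurd h2 (by simpa using hcu)

-- ===== VERDICT (by name: the statement is the Claim_ definition above) =====
theorem isalpha_spec : Claim_equal_isalpha := by
  intro word _
  unfold Spec_isalpha isalpha
  rw [Bool.eq_iff_iff, isalphaLoop_eq_true_iff, isalpha_alt_eq_true_iff]
  constructor
  · intro h c hc; exact (mem_mychars_iff c).mp (h c hc)
  · intro h c hc; exact (mem_mychars_iff c).mpr (h c hc)
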